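-- pv_equiv track=rewrite | github.com/billybimbob/advent | day-6/homework.py | total_transposed_values
-- ===== SOURCE A (Python) =====
-- from collections.abc import Iterable
--
-- def product(values: Iterable[int], start=1) -> int:
--     result = start
--     for v in values:
--         result *= v
--     return result
--
-- def parse_column(column: list[str]) -> int:
--     return int("".join(column))
--
-- def total_transposed_values(agg_line: str, values: list[list[str]]) -> int:
--     total = 0
--     column_width = 0
--     operation = ""
--
--     for i, letter in enumerate(agg_line):
--         if letter.isspace():
--             column_width += 1
--             continue
--
--         if operation:
--             target_columns = values[i - 1 - column_width : i - 1]
--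
--             if operation == "+":
--                 total += sum(parse_column(num_str) for num_str in target_columns)
--             elif operation == "*":
--                 total += product(parse_column(num_str) for num_str in target_columns)
--
--         column_width = 0
--         operation = letter
--
--     if operation:
--         target_columns = values[len(agg_line) - 1 - column_width : len(agg_line)]
--
--         if operation == "+":
--             total += sum(parse_column(num_str) for num_str in target_columns)
--         elif operation == "*":
--             total += product(parse_column(num_str) for num_str in target_columns)
--
--     return total
-- ===== SOURCE B (Python) =====
-- from collections.abc import Iterable
--
-- def product(values: Iterable[int], start=1) -> int:
--     result = start
--     for v in values:
--         result *= v
--     return result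
--
-- def parse_column(column: list[str]) -> int:
--     return int("".join(column))
--
-- def total_transposed_values(agg_line: str, values: list[list[str]]) -> int:
--     # two-pass decomposition: collect operator positions, then aggregate each
--     # operator's column slice (up to the next operator's index - 1, or to
--     # len(agg_line) for the last operator)
--     ops = [(i, c) for i, c in enumerate(agg_line) if not c.isspace()]
--     ends = [q - 1 for q, _ in ops[1:]] + [len(agg_line)]
--     total = 0
--     for (p, c), end in zip(ops, ends):
--         cols = values[p:end]
--         if c == "+":
--             total += sum(parse_column(s) for s in cols)
--         elif c == "*":
--             total += product(parse_column(s) for s in cols)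
--     return total
-- ===== Notes on version B (the rewrite author's own statement) =====
-- stated objective: alternative
-- what changed: Replaces A's single stateful scan (carrying pending operation and space counter across iterations) with a two-pass decomposition: first collect the operator positions, then aggregate each operator's column slice directly against its successor's index.
import Mathlib
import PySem

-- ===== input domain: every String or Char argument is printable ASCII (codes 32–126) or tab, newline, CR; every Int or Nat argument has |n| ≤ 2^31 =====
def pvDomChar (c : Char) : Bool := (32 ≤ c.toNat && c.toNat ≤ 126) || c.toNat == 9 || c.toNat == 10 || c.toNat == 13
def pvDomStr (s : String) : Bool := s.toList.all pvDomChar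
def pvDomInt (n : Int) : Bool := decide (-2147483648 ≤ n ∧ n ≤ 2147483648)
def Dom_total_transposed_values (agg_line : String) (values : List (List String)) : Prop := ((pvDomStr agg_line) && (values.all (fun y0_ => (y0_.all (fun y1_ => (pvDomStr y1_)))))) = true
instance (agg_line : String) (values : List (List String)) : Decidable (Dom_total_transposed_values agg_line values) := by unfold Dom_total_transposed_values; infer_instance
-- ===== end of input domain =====

-- B replaces A's single stateful scan (pending operation + space counter carried
-- across iterations) by a two-pass decomposition: collect operator positions,
-- then aggregate each operator's slice against its successor's index
-- (alternative decomposition, same cost).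

-- ===== PORT A =====
-- parse_column(column) = int("".join(column)); inputs where int() raises are excluded by Pre_
def pvParse (col : List String) : Int := (PySem.Int.ofStr? (PySem.Str.join "" col)).getD 0

def pvStepA (values : List (List String)) (st : Int × Int × String) (ic : Int × Char) : Int × Int × String :=
  if PySem.Chars.isspace ic.2 then (st.1, st.2.1 + 1, st.2.2)
  else
    let total :=
      if st.2.2 ≠ "" then
        let tcs := PySem.List.slice values (some (ic.1 - 1 - st.2.1)) (some (ic.1 - 1))
        if st.2.2 = "+" then st.1 + tcs.foldl (fun a s => a + pvParse s) 0
        else if st.2.2 = "*" then st.1 + tcs.foldl (fun a s => a * pvParse s) 1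
        else st.1
      else st.1
    (total, 0, String.ofList [ic.2])

def pvFinA (values : List (List String)) (L : Int) (st : Int × Int × String) : Int :=
  if st.2.2 ≠ "" then
    let tcs := PySem.List.slice values (some (L - 1 - st.2.1)) (some L)
    if st.2.2 = "+" then st.1 + tcs.foldl (fun a s => a + pvParse s) 0
    else if st.2.2 = "*" then st.1 + tcs.foldl (fun a s => a * pvParse s) 1
    else st.1
  else st.1

def total_transposed_values (agg_line : String) (values : List (List String)) : Int :=
  pvFinA values (agg_line.toList.length : Int)
    ((PySem.List.enumerate agg_line.toList 0).foldl (pvStepA values) (0, 0, ""))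

-- ===== PORT B =====
def pvStepB (values : List (List String)) (total : Int) (pe : (Int × Char) × Int) : Int :=
  let cols := PySem.List.slice values (some pe.1.1) (some pe.2)
  if pe.1.2 = '+' then total + cols.foldl (fun a s => a + pvParse s) 0
  else if pe.1.2 = '*' then total + cols.foldl (fun a s => a * pvParse s) 1
  else total

def total_transposed_values_alt (agg_line : String) (values : List (List String)) : Int :=
  let ops := (PySem.List.enumerate agg_line.toList 0).filter (fun ic => !(PySem.Chars.isspace ic.2))
  let ends := (ops.drop 1).map (fun qc => qc.1 - 1) ++ [(agg_line.toList.length : Int)]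
  (ops.zip ends).foldl (pvStepB values) 0

-- ===== PRECONDITION & SPEC =====
-- Pre_ excludes exactly the inputs on which A raises ValueError: a column in a
-- slice consumed by a '+'/'*' operator whose joined string int() rejects.
def pvColOK (col : List String) : Bool := (PySem.Int.ofStr? (PySem.Str.join "" col)).isSome

def pvIsOpAt (l : List Char) (p : Nat) : Bool := l.getD p ' ' == '+' || l.getD p ' ' == '*'

def pvAllSpaceBetween (l : List Char) (p q : Nat) : Bool :=
  (List.range q).all fun r => !(decide (p < r)) || PySem.Chars.isspace (l.getD r ' ')

def Pre_total_transposed_values (agg_line : String) (values : List (List String)) : Prop :=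
  (((List.range agg_line.toList.length).all fun p =>
      (List.range agg_line.toList.length).all fun q =>
        !(decide (p < q) && pvIsOpAt agg_line.toList p
            && !(PySem.Chars.isspace (agg_line.toList.getD q ' '))
            && pvAllSpaceBetween agg_line.toList p q)
        || (PySem.List.slice values (some (p : Int)) (some ((q : Int) - 1))).all pvColOK)
    && ((List.range agg_line.toList.length).all fun p =>
      !(pvIsOpAt agg_line.toList p
          && pvAllSpaceBetween agg_line.toList p agg_line.toList.length)
      || (PySem.List.slice values (some (p : Int)) (some (agg_line.toList.length : Int))).all pvColOK)) = true

instance (agg_line : String) (values : List (List String)) : Decidable (Pre_total_transposed_values agg_line values) := by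
  unfold Pre_total_transposed_values; infer_instance

def pvWitness_total_transposed_values : String × List (List String) := ("+ *", [["1"], ["2"], ["3"], ["4"]])

def Spec_total_transposed_values (agg_line : String) (values : List (List String)) (out : Int) : Prop := out = total_transposed_values_alt agg_line values
instance (agg_line : String) (values : List (List String)) (out : Int) : Decidable (Spec_total_transposed_values agg_line values out) := by unfold Spec_total_transposed_values; infer_instance

-- ===== CLAIM (what is proved, stated in full; the proofs are below) =====
def Claim_equal_total_transposed_values : Prop := ∀ (agg_line : String) (values : List (List String)), Dom_total_transposed_values agg_line values → Pre_total_transposed_values agg_line values → Spec_total_transposed_values agg_line values (total_transposed_values agg_line values)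

-- ===== LEMMAS AND PROOFS =====

-- contribution of one operator c at position p whose slice ends at e
def pvAgg (values : List (List String)) (c : Char) (p e : Int) : Int :=
  let cols := PySem.List.slice values (some p) (some e)
  if c = '+' then cols.foldl (fun a s => a + pvParse s) 0
  else if c = '*' then cols.foldl (fun a s => a * pvParse s) 1
  else 0

-- reference aggregation over the operator list (slice ends at successor's index - 1; N at the end)
def pvGo (values : List (List String)) (N : Int) : List (Int × Char) → Int
  | [] => 0
  | [(p, c)] => pvAgg values c p N
  | (p, c) :: (q, d) :: rest => pvAgg values c p (q - 1) + pvGo values N ((q, d) :: rest)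

theorem pv_ofList_inj (a b : List Char) : (String.ofList a = String.ofList b) ↔ a = b := by
  constructor
  · intro h; have := congrArg String.toList h; simpa [String.toList_ofList] using this
  · intro h; rw [h]

theorem pv_single_ne_empty (c : Char) : (String.ofList [c] = "") ↔ False := by
  rw [show ("" : String) = String.ofList [] from (String.ofList_nil).symm, pv_ofList_inj]
  simp

theorem pv_single_eq_plus (c : Char) : (String.ofList [c] = "+") ↔ c = '+' := by
  rw [show ("+" : String) = String.ofList ['+'] from rfl, pv_ofList_inj]
  simp

theorem pv_single_eq_star (c : Char) : (String.ofList [c] = "*") ↔ c = '*' := by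
  rw [show ("*" : String) = String.ofList ['*'] from rfl, pv_ofList_inj]
  simp

theorem finA_empty (values : List (List String)) (N t cw : Int) :
    pvFinA values N (t, cw, "") = t := by
  simp [pvFinA]

theorem finA_single (values : List (List String)) (N t cw : Int) (c : Char) :
    pvFinA values N (t, cw, String.ofList [c]) = t + pvAgg values c (N - 1 - cw) N := by
  unfold pvFinA pvAgg
  simp only [pv_single_ne_empty, pv_single_eq_plus, pv_single_eq_star, ne_eq, not_false_iff]
  by_cases hp : c = '+'
  · simp [hp]
  · by_cases hm : c = '*'
    · simp [hm]
    · simp [hp, hm]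

theorem stepA_space (values : List (List String)) (t cw : Int) (op : String) (i : Int) (ch : Char)
    (h : PySem.Chars.isspace ch = true) :
    pvStepA values (t, cw, op) (i, ch) = (t, cw + 1, op) := by
  simp [pvStepA, h]

theorem stepA_empty (values : List (List String)) (t cw : Int) (i : Int) (ch : Char)
    (h : PySem.Chars.isspace ch = false) :
    pvStepA values (t, cw, "") (i, ch) = (t, 0, String.ofList [ch]) := by
  simp [pvStepA, h]

theorem stepA_op (values : List (List String)) (t cw : Int) (c : Char) (i : Int) (ch : Char)
    (h : PySem.Chars.isspace ch = false) :
    pvStepA values (t, cw, String.ofList [c]) (i, ch)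
      = (t + pvAgg values c (i - 1 - cw) (i - 1), 0, String.ofList [ch]) := by
  unfold pvStepA pvAgg
  simp only [h, Bool.false_eq_true, if_false, pv_single_ne_empty, pv_single_eq_plus,
    pv_single_eq_star, ne_eq, not_false_iff]
  by_cases hp : c = '+'
  · simp [hp]
  · by_cases hm : c = '*'
    · simp [hm]
    · simp [hp, hm]

theorem stepB_eq (values : List (List String)) (t : Int) (pe : (Int × Char) × Int) :
    pvStepB values t pe = t + pvAgg values pe.1.2 pe.1.1 pe.2 := by
  simp only [pvStepB, pvAgg]
  split_ifs <;> simp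

theorem B_fold (values : List (List String)) (N : Int) :
    ∀ (ops : List (Int × Char)) (t : Int),
      (ops.zip ((ops.drop 1).map (fun qc => qc.1 - 1) ++ [N])).foldl (pvStepB values) t
        = t + pvGo values N ops := by
  intro ops
  induction ops with
  | nil => intro t; simp [pvGo]
  | cons x rest ih =>
    intro t
    cases rest with
    | nil => simp [pvGo, stepB_eq]
    | cons y rest' =>
      have ih' := ih (pvStepB values t (x, y.1 - 1))
      simp only [List.drop_succ_cons, List.drop_zero] at ih' ⊢
      simp only [List.map_cons, List.cons_append, List.zip_cons_cons, List.foldl_cons]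
      rw [ih', stepB_eq]
      rcases x with ⟨p, c⟩; rcases y with ⟨q, d⟩
      simp only [pvGo]
      ring

theorem A_fold_some (values : List (List String)) :
    ∀ (l : List Char) (i t p : Int) (c : Char),
      pvFinA values (i + l.length)
        ((PySem.List.enumerate l i).foldl (pvStepA values) (t, i - 1 - p, String.ofList [c]))
        = t + pvGo values (i + l.length)
            ((p, c) :: (PySem.List.enumerate l i).filter (fun ic => !(PySem.Chars.isspace ic.2))) := by
  intro l
  induction l with
  | nil =>
    intro i t p c
    simp only [PySem.List.enumerate_nil, List.foldl_nil, List.filter_nil, List.length_nil,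
      Nat.cast_zero, add_zero]
    rw [finA_single]
    rw [show i - 1 - (i - 1 - p) = p from by ring]
    simp [pvGo]
  | cons ch l' ih =>
    intro i t p c
    rw [PySem.List.enumerate_cons]
    simp only [List.foldl_cons, List.filter_cons, List.length_cons]
    push_cast
    rw [show i + ((l'.length : Int) + 1) = (i + 1) + (l'.length : Int) from by ring]
    by_cases hsp : PySem.Chars.isspace ch = true
    · rw [stepA_space values t (i - 1 - p) _ i ch hsp, hsp]
      rw [show i - 1 - p + 1 = (i + 1) - 1 - p from by ring]
      have := ih (i + 1) t p c
      simpa using this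
    · have hb : PySem.Chars.isspace ch = false := by
        cases h : PySem.Chars.isspace ch
        · rfl
        · exact absurd h hsp
      rw [stepA_op values t (i - 1 - p) c i ch hb, hb]
      rw [show i - 1 - (i - 1 - p) = p from by ring]
      have := ih (i + 1) (t + pvAgg values c p (i - 1)) i ch
      rw [show (i + 1) - 1 - i = (0 : Int) from by ring] at this
      simp only [Bool.not_false, if_pos] at *
      rw [this]
      simp only [pvGo]
      ring

theorem A_fold_none (values : List (List String)) :
    ∀ (l : List Char) (i t cw : Int),
      pvFinA values (i + l.length)
        ((PySem.List.enumerate l i).foldl (pvStepA values) (t, cw, ""))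
        = t + pvGo values (i + l.length)
            ((PySem.List.enumerate l i).filter (fun ic => !(PySem.Chars.isspace ic.2))) := by
  intro l
  induction l with
  | nil =>
    intro i t cw
    simp [finA_empty, pvGo]
  | cons ch l' ih =>
    intro i t cw
    rw [PySem.List.enumerate_cons]
    simp only [List.foldl_cons, List.filter_cons, List.length_cons]
    push_cast
    rw [show i + ((l'.length : Int) + 1) = (i + 1) + (l'.length : Int) from by ring]
    by_cases hsp : PySem.Chars.isspace ch = true
    · rw [stepA_space values t cw _ i ch hsp, hsp]
      exact ih (i + 1) t (cw + 1)
    · have hb : PySem.Chars.isspace ch = false := by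
        cases h : PySem.Chars.isspace ch
        · rfl
        · exact absurd h hsp
      rw [stepA_empty values t cw i ch hb, hb]
      have := A_fold_some values l' (i + 1) t i ch
      rw [show (i + 1) - 1 - i = (0 : Int) from by ring] at this
      simpa using this

-- ===== VERDICT (by name: the statement is the Claim_ definition above) =====
theorem total_transposed_values_spec : Claim_equal_total_transposed_values := by
  intro agg_line values _ _
  unfold Spec_total_transposed_values
  simp only [total_transposed_values, total_transposed_values_alt]
  have hA := A_fold_none values agg_line.toList 0 0 0
  simp only [zero_add] at hA
  rw [hA, B_fold, zero_add]
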